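-- pv_equiv track=rewrite | github.com/jgonzaleztem/PDF | correcciones_automaticas/tags_fixer.py | _detect_circular_mappings
-- ===== SOURCE A (Python) =====
-- from typing import Dict, List, Set, Tuple, Optional, Any, Union
--
-- def _detect_circular_mappings(mapping_graph: Dict) -> List[List[str]]:
--     """
--     Detecta ciclos en el grafo de mapeos.
--
--     Args:
--         mapping_graph: Diccionario representando el grafo de mapeos
--
--     Returns:
--         List[List[str]]: Lista de ciclos detectados
--     """
--     cycles = []
--     visited = set()
--     path = []
--
--     def dfs(node):
--         if node in path:
--             # Ciclo detectado
--             cycle_start = path.index(node)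
--             cycles.append(path[cycle_start:] + [node])
--             return
--
--         if node in visited:
--             return
--
--         visited.add(node)
--         path.append(node)
--
--         if node in mapping_graph:
--             next_node = mapping_graph[node]
--             # Eliminar prefijo "/" si está presente
--             if isinstance(next_node, str) and next_node.startswith("/"):
--                 next_node = next_node[1:]
--             dfs(next_node)
--
--         path.pop()
--
--     # Normalizar claves
--     normalized_graph = {}
--     for key, value in mapping_graph.items():
--         if isinstance(key, str) and key.startswith("/"):
--             key = key[1:]
--         if isinstance(value, str) and value.startswith("/"):
--             value = value[1:]
--         normalized_graph[key] = value
--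
--     for node in normalized_graph:
--         if node not in visited:
--             dfs(node)
--
--     return cycles
-- ===== SOURCE B (Python) =====
-- def _detect_circular_mappings(mapping_graph):
--     """Iterative chain-walk version: same cycle detection without recursion."""
--     cycles = []
--     visited = set()
--     for key in mapping_graph:
--         start = key[1:] if isinstance(key, str) and key.startswith("/") else key
--         if start in visited:
--             continue
--         path = []
--         pos = {}
--         current = start
--         while True:
--             if current in pos:
--                 cycles.append(path[pos[current]:] + [current])
--                 break
--             if current in visited:
--                 break
--             visited.add(current)
--             pos[current] = len(path)
--             path.append(current)
--             if current in mapping_graph: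
--                 nxt = mapping_graph[current]
--                 if isinstance(nxt, str) and nxt.startswith("/"):
--                     nxt = nxt[1:]
--                 current = nxt
--             else:
--                 break
--     return cycles
-- ===== Notes on version B (the rewrite author's own statement) =====
-- stated objective: alternative
-- what changed: Replaces the recursive dfs with shared mutable path (linear 'node in path' and path.index scans, pop-on-return) by an iterative per-start chain walk that keeps a local path list plus a position dictionary for O(1) membership and cycle-start index; the outer loop iterates the raw keys with a visited guard instead of building a normalized dict first.
import Mathlib
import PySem

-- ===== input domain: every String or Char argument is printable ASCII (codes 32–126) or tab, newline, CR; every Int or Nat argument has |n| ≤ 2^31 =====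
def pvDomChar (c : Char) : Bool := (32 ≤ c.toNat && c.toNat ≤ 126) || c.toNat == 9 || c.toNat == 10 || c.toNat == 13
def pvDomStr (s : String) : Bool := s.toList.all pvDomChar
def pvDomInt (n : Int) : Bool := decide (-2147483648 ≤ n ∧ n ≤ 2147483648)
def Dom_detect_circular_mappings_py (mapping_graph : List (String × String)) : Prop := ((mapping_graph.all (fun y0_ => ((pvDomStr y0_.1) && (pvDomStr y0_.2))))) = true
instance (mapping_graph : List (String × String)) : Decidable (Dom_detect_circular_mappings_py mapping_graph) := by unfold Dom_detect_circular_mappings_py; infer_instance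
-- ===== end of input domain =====

-- B replaces A's recursive dfs (shared mutable path with pop-on-return, list membership and
-- list.index scans) by an iterative chain walk per start node with a local path and a
-- position dictionary; return values agree on every input (objective: alternative decomposition).

-- strip a leading "/" (used by both Pythons on keys/successors)
def pvStrip (s : String) : String :=
  if PySem.Str.startswith s "/" then PySem.Str.slice s (some 1) none else s

-- ===== PORT A =====
-- A's dfs: mutates (cycles, visited, path); path is pushed before the recursive call and
-- popped after it.  Fuel is a termination device only: each recursive call happens with a
-- previously unvisited key of g added to visited, so size+1 fuel is never exhausted.
def pvDfsA (g : PySem.Dict String String) :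
    Nat → String → List (List String) × PySem.Set String × List String →
    List (List String) × PySem.Set String × List String
  | 0, _, st => st
  | fuel + 1, node, (cycles, visited, path) =>
    if node ∈ path then
      (cycles ++ [PySem.List.slice path (some (((PySem.List.index? path node).getD 0 : Nat) : Int)) none ++ [node]],
       visited, path)
    else if node ∈ visited then
      (cycles, visited, path)
    else
      let visited' := PySem.Set.add visited node
      let path' := path ++ [node]
      let st' :=
        if g.contains node then
          pvDfsA g fuel (pvStrip (g.getD node "")) (cycles, visited', path')
        else (cycles, visited', path')
      (st'.1, st'.2.1, st'.2.2.dropLast)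

def detect_circular_mappings_py (mapping_graph : List (String × String)) : List (List String) :=
  let g := PySem.Dict.ofList mapping_graph
  let normalized := g.items.foldl
    (fun d kv => d.insert (pvStrip kv.1) (pvStrip kv.2)) (PySem.Dict.empty : PySem.Dict String String)
  let fin := normalized.keys.foldl
    (fun st node => if node ∈ st.2.1 then st else pvDfsA g (mapping_graph.length + 1) node st)
    ([], PySem.Set.empty, [])
  fin.1

-- ===== PORT B =====
-- B's while-loop: walks the successor chain from one start node; `pos` maps each node on the
-- current local path to its index in it.  Same fuel device as A's dfs.
def pvWalkB (g : PySem.Dict String String) :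
    Nat → String → List (List String) → PySem.Set String → List String → PySem.Dict String Int →
    List (List String) × PySem.Set String
  | 0, _, cycles, visited, _, _ => (cycles, visited)
  | fuel + 1, current, cycles, visited, path, pos =>
    if pos.contains current then
      (cycles ++ [PySem.List.slice path (some (pos.getD current 0)) none ++ [current]], visited)
    else if current ∈ visited then
      (cycles, visited)
    else
      let visited' := PySem.Set.add visited current
      let pos' := pos.insert current (path.length : Int)
      let path' := path ++ [current]
      if g.contains current then
        pvWalkB g fuel (pvStrip (g.getD current "")) cycles visited' path' pos'
      else (cycles, visited')

def detect_circular_mappings_py_alt (mapping_graph : List (String × String)) : List (List String) :=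
  let g := PySem.Dict.ofList mapping_graph
  let fin := g.keys.foldl
    (fun st key =>
      let start := pvStrip key
      if start ∈ st.2 then st
      else pvWalkB g (mapping_graph.length + 1) start st.1 st.2 [] PySem.Dict.empty)
    ([], PySem.Set.empty)
  fin.1

-- ===== PRECONDITION & SPEC =====
def Spec_detect_circular_mappings_py (mapping_graph : List (String × String)) (out : List (List String)) : Prop := out = detect_circular_mappings_py_alt mapping_graph
instance (mapping_graph : List (String × String)) (out : List (List String)) : Decidable (Spec_detect_circular_mappings_py mapping_graph out) := by unfold Spec_detect_circular_mappings_py; infer_instance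

-- ===== CLAIM (what is proved, stated in full; the proofs are below) =====
def Claim_equal_detect_circular_mappings_py : Prop := ∀ (mapping_graph : List (String × String)), Dom_detect_circular_mappings_py mapping_graph → Spec_detect_circular_mappings_py mapping_graph (detect_circular_mappings_py mapping_graph)

-- ===== LEMMAS AND PROOFS =====

def pvInv (path : List String) (pos : PySem.Dict String Int) : Prop :=
  ∀ x : String, pos.get? x = if x ∈ path then some ((path.idxOf x : Nat) : Int) else none
theorem pvInv_step {path pos} (h : pvInv path pos) {node : String} (hn : node ∉ path) :
    pvInv (path ++ [node]) (pos.insert node (path.length : Int)) := by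
  intro x
  rw [PySem.Dict.get?_insert]
  by_cases hx : x = node
  · subst hx
    simp [List.idxOf_append, hn, List.mem_append]
  · rw [if_neg hx, h x]
    by_cases hxp : x ∈ path
    · simp [hxp, List.idxOf_append]
    · have : x ∉ path ++ [node] := by simp [List.mem_append, hxp, hx]
      simp [hxp, this]

theorem pvDfsA_eq_walk (g : PySem.Dict String String) :
    ∀ (fuel : Nat) (node : String) (cycles : List (List String)) (visited : PySem.Set String)
      (path : List String) (pos : PySem.Dict String Int), pvInv path pos →
      pvDfsA g fuel node (cycles, visited, path) =
        ((pvWalkB g fuel node cycles visited path pos).1,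
         (pvWalkB g fuel node cycles visited path pos).2, path) := by
  intro fuel
  induction fuel with
  | zero => intro node c v p pos _; simp [pvDfsA, pvWalkB]
  | succ n ih =>
    intro node c v p pos hinv
    have hcont : pos.contains node = decide (node ∈ p) := by
      rw [PySem.Dict.contains_eq_isSome_get?, hinv node]
      by_cases h : node ∈ p <;> simp [h]
    by_cases hmem : node ∈ p
    · have hidx : (List.idxOf? node p).getD 0 = List.idxOf node p := by
        have h1 : (List.idxOf? node p).isSome := by
          rw [Option.isSome_iff_ne_none]
          simp [List.idxOf?_eq_none_iff, hmem]
        obtain ⟨i, hi⟩ := Option.isSome_iff_exists.mp h1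
        rw [List.idxOf_eq_getD_idxOf?, hi]
        rfl
      have hgd : pos.getD node 0 = ((p.idxOf node : Nat) : Int) := by
        rw [PySem.Dict.getD_eq_get?_getD, hinv node, if_pos hmem]; rfl
      simp [pvDfsA, pvWalkB, hmem, hcont, hidx, hgd]
    · by_cases hvis : node ∈ v
      · simp [pvDfsA, pvWalkB, hmem, hcont, hvis]
      · have hinv' := pvInv_step hinv hmem
        by_cases hg : g.contains node
        · have := ih (pvStrip (g.getD node "")) c (PySem.Set.add v node) (p ++ [node])
            (pos.insert node (p.length : Int)) hinv'
          rw [PySem.Set.add_of_not_mem hvis] at this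
          simp [pvDfsA, pvWalkB, hmem, hcont, hvis, hg, this]
        · simp [pvDfsA, pvWalkB, hmem, hcont, hvis, hg]

theorem pvWalkB_visited_mono (g : PySem.Dict String String) :
    ∀ (fuel : Nat) (node : String) (cycles : List (List String)) (visited : PySem.Set String)
      (path : List String) (pos : PySem.Dict String Int) (y : String), y ∈ visited →
      y ∈ (pvWalkB g fuel node cycles visited path pos).2 := by
  intro fuel
  induction fuel with
  | zero => intro node c v p pos y hy; simpa [pvWalkB] using hy
  | succ n ih =>
    intro node c v p pos y hy
    by_cases h1 : pos.contains node
    · simpa [pvWalkB, h1] using hy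
    · by_cases h2 : node ∈ v
      · simpa [pvWalkB, h1, h2] using hy
      · have hy' : y ∈ PySem.Set.add v node := by
          rw [PySem.Set.mem_add]; exact Or.inl hy
        by_cases h3 : g.contains node
        · simpa [pvWalkB, h1, h2, h3] using
            ih (pvStrip (g.getD node "")) c (PySem.Set.add v node) (p ++ [node])
              (pos.insert node (p.length : Int)) y hy'
        · simpa [pvWalkB, h1, h2, h3] using hy'

def pvStep (g : PySem.Dict String String) (F : Nat)
    (st : List (List String) × PySem.Set String) (node : String) :
    List (List String) × PySem.Set String :=
  if node ∈ st.2 then st else pvWalkB g F node st.1 st.2 [] PySem.Dict.empty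

theorem pvInv_empty : pvInv [] PySem.Dict.empty := by
  intro x; simp [PySem.Dict.get?_empty]

theorem pvStep_self (g : PySem.Dict String String) (m : Nat) (st) (x : String) :
    x ∈ (pvStep g (m + 1) st x).2 := by
  by_cases h : x ∈ st.2
  · simp only [pvStep, if_pos h]; exact h
  · have hc : (PySem.Dict.empty : PySem.Dict String Int).contains x = false := by
      simp [PySem.Dict.contains_empty]
    simp only [pvStep, if_neg h, pvWalkB, hc]
    simp only [Bool.false_eq_true, if_false]
    by_cases hg : g.contains x
    · simp only [hg, if_true]
      exact pvWalkB_visited_mono g m _ _ _ _ _ x (by rw [PySem.Set.mem_add]; exact Or.inr rfl)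
    · simp only [hg]
      simp [PySem.Set.mem_add]
  
theorem pvStep_mono (g : PySem.Dict String String) (F : Nat) (st) (x y : String)
    (hy : y ∈ st.2) : y ∈ (pvStep g F st x).2 := by
  by_cases h : x ∈ st.2
  · simp only [pvStep, if_pos h]; exact hy
  · simp only [pvStep, if_neg h]
    exact pvWalkB_visited_mono g F _ _ _ _ _ y hy

theorem pvFoldl_discard (g : PySem.Dict String String) (F : Nat) (x : String) :
    ∀ (l : List String) (st), x ∈ st.2 →
      (PySem.Set.discard l x).foldl (pvStep g F) st = l.foldl (pvStep g F) st := by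
  intro l
  induction l with
  | nil => intro st _; rfl
  | cons a t ih =>
    intro st hx
    by_cases hax : a = x
    · subst hax
      have : pvStep g F st a = st := by simp [pvStep, hx]
      simp only [PySem.Set.discard, List.filter_cons, beq_self_eq_true, Bool.not_true,
        List.foldl_cons, this]
      exact ih st hx
    · have hax' : (!(a == x)) = true := by simp [hax]
      simp only [PySem.Set.discard, List.filter_cons, hax', if_true, List.foldl_cons]
      exact ih (pvStep g F st a) (pvStep_mono g F st a x hx)

theorem pvFoldl_ofList (g : PySem.Dict String String) (m : Nat) :
    ∀ (xs : List String) (st),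
      (PySem.Set.ofList xs).foldl (pvStep g (m + 1)) st = xs.foldl (pvStep g (m + 1)) st := by
  intro xs
  induction xs with
  | nil => intro st; rfl
  | cons x t iht =>
    intro st
    rw [PySem.Set.ofList_cons]
    simp only [List.foldl_cons]
    rw [pvFoldl_discard g (m + 1) x (PySem.Set.ofList t) (pvStep g (m + 1) st x)
      (pvStep_self g m st x)]
    exact iht (pvStep g (m + 1) st x)

theorem pvFold_rel (g : PySem.Dict String String) (F : Nat) :
    ∀ (ns : List String) (c : List (List String)) (v : PySem.Set String),
      ns.foldl (fun st node => if node ∈ st.2.1 then st else pvDfsA g F node st) (c, v, []) =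
        ((ns.foldl (pvStep g F) (c, v)).1, (ns.foldl (pvStep g F) (c, v)).2, []) := by
  intro ns
  induction ns with
  | nil => intro c v; rfl
  | cons n t ih =>
    intro c v
    simp only [List.foldl_cons]
    by_cases h : n ∈ v
    · have h1 : pvStep g F (c, v) n = (c, v) := by simp [pvStep, h]
      simp only [h, if_true, h1]
      exact ih c v
    · have h2 := pvDfsA_eq_walk g F n c v [] PySem.Dict.empty pvInv_empty
      have h1 : pvStep g F (c, v) n = (pvWalkB g F n c v [] PySem.Dict.empty) := by
        simp [pvStep, h]
      simp only [h, if_false, h1, h2]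
      simpa using ih (pvWalkB g F n c v [] PySem.Dict.empty).1 (pvWalkB g F n c v [] PySem.Dict.empty).2

theorem main_lemma : ∀ (mapping_graph : List (String × String)),
    detect_circular_mappings_py mapping_graph = detect_circular_mappings_py_alt mapping_graph := by
  intro mg
  unfold detect_circular_mappings_py detect_circular_mappings_py_alt
  simp only []
  set g := PySem.Dict.ofList mg with hg
  have hkeys : (g.items.foldl
      (fun d kv => d.insert (pvStrip kv.1) (pvStrip kv.2))
      (PySem.Dict.empty : PySem.Dict String String)).keys =
      PySem.Set.ofList (g.keys.map pvStrip) := by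
    rw [PySem.Dict.keys_foldl_insert_key g.items (fun kv => pvStrip kv.1)
      (fun _ kv => pvStrip kv.2) PySem.Dict.empty]
    rw [PySem.Dict.keys_empty, PySem.Set.update_nil_left]
    congr 1
    simp [PySem.Dict.keys, List.map_map]
  rw [hkeys]
  rw [pvFold_rel g (mg.length + 1) (PySem.Set.ofList (g.keys.map pvStrip)) [] PySem.Set.empty]
  rw [pvFoldl_ofList g mg.length (g.keys.map pvStrip) ([], PySem.Set.empty)]
  rw [List.foldl_map]
  rfl

-- ===== VERDICT (by name: the statement is the Claim_ definition above) =====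
theorem detect_circular_mappings_py_spec : Claim_equal_detect_circular_mappings_py := by
  intro mg _
  unfold Spec_detect_circular_mappings_py
  exact main_lemma mg
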